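-- pv_equiv track=rewrite | github.com/BMPixel/moffee | mdbeamer/utils/md_obsidian_ext.py | dequote
-- ===== SOURCE A (Python) =====
-- def dequote(text: str) -> tuple[str, str]:
--     """ Remove a quote mark (>) from the front of each line of the given text. """
--     newtext = []
--     lines = text.split('\n')
--     for line in lines:
--         if line.startswith('> '):
--             newtext.append(line[2:])
--         elif line.startswith('>'):
--             newtext.append(line[1:])
--         elif not line.strip():
--             newtext.append('')
--         else:
--             break
--     return '\n'.join(newtext), '\n'.join(lines[len(newtext):])
-- ===== SOURCE B (Python) =====
-- def dequote(text: str) -> tuple[str, str]: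
--     """ Remove a quote mark (>) from the front of each line of the given text. """
--     def go(s):
--         # Recursive descent over the raw text: peel off the first line, strip its
--         # quote mark, and recurse on the tail; never materializes a list of lines.
--         # Returns (q, rest): q is None when the first line of s ends the quote
--         # block (then rest == s), else q is the '\n'-joined stripped prefix and
--         # rest is the text after that prefix.
--         i = s.find('\n')
--         line = s if i < 0 else s[:i]
--         if line.startswith('> '):
--             stripped = line[2:]
--         elif line.startswith('>'):
--             stripped = line[1:]
--         elif not line.strip():
--             stripped = ''
--         else:
--             return None, s
--         if i < 0:
--             return stripped, ''
--         q, rest = go(s[i + 1:])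
--         return (stripped if q is None else stripped + '\n' + q), rest
--     q, rest = go(text)
--     return ('' if q is None else q), rest
-- ===== Notes on version B (the rewrite author's own statement) =====
-- stated objective: alternative
-- what changed: B never builds the list of lines: it is a single recursive descent over the raw text that splits off one line at a time (find the next newline, slice), strips it, and assembles both joined result strings directly during the recursion, instead of A's split into a lines list + append loop + two join passes.
import Mathlib
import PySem

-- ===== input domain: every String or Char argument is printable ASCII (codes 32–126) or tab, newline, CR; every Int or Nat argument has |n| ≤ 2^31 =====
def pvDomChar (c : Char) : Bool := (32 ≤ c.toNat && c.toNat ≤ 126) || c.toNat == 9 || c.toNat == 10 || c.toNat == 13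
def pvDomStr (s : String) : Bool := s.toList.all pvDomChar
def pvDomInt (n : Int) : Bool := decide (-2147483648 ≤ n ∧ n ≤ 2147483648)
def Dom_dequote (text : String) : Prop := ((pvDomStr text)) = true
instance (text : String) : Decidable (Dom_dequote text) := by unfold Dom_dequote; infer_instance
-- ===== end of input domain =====

-- B replaces A's split-into-lines + loop + two joins by a single recursive descent over the raw text that peels one line at a time and assembles both joined results during the recursion; alternative decomposition, same cost.


-- ===== PORT A =====
-- A's loop: strip each leading line and append it; break at the first non-quote, non-blank line.
-- Lines are kept as List Char (the sanctioned list side of PySem strings); line[2:] / line[1:] are PySem.List.slice.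
def dequoteLoopA : List (List Char) → List (List Char)
  | [] => []
  | l :: ls =>
    if PySem.Chars.startswith l ['>', ' '] then PySem.List.slice l (some 2) none :: dequoteLoopA ls
    else if PySem.Chars.startswith l ['>'] then PySem.List.slice l (some 1) none :: dequoteLoopA ls
    else if PySem.Chars.strip l = [] then [] :: dequoteLoopA ls
    else []

def dequote (text : String) : String × String :=
  let lines := PySem.Chars.splitOn text.toList ['\n']          -- text.split('\n'), sep ≠ ""
  let newtext := dequoteLoopA lines
  (String.ofList (PySem.Chars.join ['\n'] newtext),                -- '\n'.join(newtext)
   String.ofList (PySem.Chars.join ['\n']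
      (PySem.List.slice lines (some (newtext.length : Int)) none)))  -- '\n'.join(lines[len(newtext):])

-- ===== PORT B =====
-- Source B's `i = s.find('\n'); line = s if i < 0 else s[:i]; … s[i+1:]` — first line and the optional
-- tail after the first '\n', the same two values, realized as one structural split.
def lineSplitB : List Char → List Char × Option (List Char)
  | [] => ([], none)
  | c :: cs =>
    if c = '\n' then ([], some cs)
    else
      let r := lineSplitB cs
      (c :: r.1, r.2)

-- termination measure for goB: the tail after the first '\n' is shorter than s
theorem lineSplitB_tail_lt (s t : List Char) (h : (lineSplitB s).2 = some t) :
    t.length < s.length := by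
  induction s generalizing t with
  | nil => simp [lineSplitB] at h
  | cons c cs ih =>
    by_cases hc : c = '\n'
    · simp [lineSplitB, hc] at h
      simp [← h]
    · simp [lineSplitB, hc] at h
      exact Nat.lt_succ_of_lt (ih t h)

-- Source B's recursive go: (q, rest) with q = none when the first line ends the quote block.
def goB (s : List Char) : Option (List Char) × List Char :=
  let ls := lineSplitB s
  let stripped? :=
    if PySem.Chars.startswith ls.1 ['>', ' '] then some (PySem.List.slice ls.1 (some 2) none)
    else if PySem.Chars.startswith ls.1 ['>'] then some (PySem.List.slice ls.1 (some 1) none)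
    else if PySem.Chars.strip ls.1 = [] then some []
    else none
  match stripped?, _hls : ls.2 with
  | none, _ => (none, s)
  | some st, none => (some st, [])
  | some st, some tail =>
    let r := goB tail
    (some (match r.1 with | none => st | some q => st ++ '\n' :: q), r.2)
termination_by s.length
decreasing_by exact lineSplitB_tail_lt s tail _hls

def dequote_alt (text : String) : String × String :=
  let r := goB text.toList
  (String.ofList (r.1.getD []), String.ofList r.2)

-- ===== PRECONDITION & SPEC =====
def Spec_dequote (text : String) (out : String × String) : Prop := out = dequote_alt text
instance (text : String) (out : String × String) : Decidable (Spec_dequote text out) := by unfold Spec_dequote; infer_instance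

-- ===== CLAIM (what is proved, stated in full; the proofs are below) =====
def Claim_equal_dequote : Prop := ∀ (text : String), Dom_dequote text → Spec_dequote text (dequote text)

-- ===== LEMMAS AND PROOFS =====

-- prepend to the first block of a list of blocks ([] counts as one empty block)
def modHead (p : List Char) : List (List Char) → List (List Char)
  | [] => [p]
  | x :: xs => (p ++ x) :: xs

-- reference splitter: what text.split('\n') computes, structurally
def sp : List Char → List (List Char)
  | [] => [[]]
  | c :: rest => if c = '\n' then [] :: sp rest else modHead [c] (sp rest)

theorem sp_ne_nil (s : List Char) : sp s ≠ [] := by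
  cases s with
  | nil => simp [sp]
  | cons c rest =>
    by_cases hc : c = '\n' <;> simp only [sp, hc, if_true, if_false, reduceCtorEq, ne_eq]
    · simp
    · cases sp rest <;> simp [modHead]

theorem modHead_append (p q : List Char) (ls : List (List Char)) :
    modHead (p ++ q) ls = modHead p (modHead q ls) := by
  cases ls <;> simp [modHead]

theorem splitOn_go_eq (fuel : Nat) :
    ∀ (l cur : List Char) (_h : l.length ≤ fuel) (acc' : List (List Char)),
      PySem.Chars.splitOn.go ['\n'] fuel l cur acc' =
        acc'.reverse ++ modHead cur.reverse (sp l) := by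
  induction fuel with
  | zero =>
    intro l cur h acc'
    interval_cases hl : l.length
    · have : l = [] := List.length_eq_zero_iff.mp hl
      subst this
      simp [PySem.Chars.splitOn.go, sp, modHead]
  | succ fuel ih =>
    intro l cur h acc'
    cases l with
    | nil => simp [PySem.Chars.splitOn.go, sp, modHead]
    | cons c rest =>
      by_cases hc : c = '\n'
      · subst hc
        have hp : (['\n'] : List Char).isPrefixOf ('\n' :: rest) = true := by
          simp [List.isPrefixOf]
        rw [PySem.Chars.splitOn.go]
        simp only [hp, if_pos, List.length_singleton, List.drop_succ_cons, List.drop_zero]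
        rw [ih rest [] (by simpa using Nat.le_of_succ_le_succ h)]
        have hne := sp_ne_nil rest
        cases hsp : sp rest with
        | nil => exact absurd hsp hne
        | cons y ys => simp [sp, modHead, hsp]
      · have hp : (['\n'] : List Char).isPrefixOf (c :: rest) = false := by
          simp [List.isPrefixOf]; exact fun hh => absurd hh.symm hc
        rw [PySem.Chars.splitOn.go]
        simp only [hp]
        rw [if_neg (by simp)]
        rw [ih rest (c :: cur) (by simpa using Nat.le_of_succ_le_succ h)]
        have : (c :: cur).reverse = cur.reverse ++ [c] := by simp
        rw [this, modHead_append]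
        simp [sp, hc]

theorem splitOn_eq_sp (s : List Char) : PySem.Chars.splitOn s ['\n'] = sp s := by
  rw [PySem.Chars.splitOn, splitOn_go_eq (s.length + 1) s [] (Nat.le_succ _) []]
  cases h : sp s with
  | nil => exact absurd h (sp_ne_nil s)
  | cons y ys => simp [modHead]

-- reconstruction and join facts
theorem lineSplitB_recon (s : List Char) :
    s = (lineSplitB s).1 ++ (match (lineSplitB s).2 with | none => [] | some t => '\n' :: t) := by
  induction s with
  | nil => simp [lineSplitB]
  | cons c cs ih =>
    by_cases hc : c = '\n'
    · simp [lineSplitB, hc]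
    · simp only [lineSplitB, if_neg hc, List.cons_append, List.cons.injEq, true_and]
      exact ih

theorem sp_lineSplitB (s : List Char) :
    sp s = (lineSplitB s).1 :: (match (lineSplitB s).2 with | none => [] | some t => sp t) := by
  induction s with
  | nil => simp [sp, lineSplitB]
  | cons c cs ih =>
    by_cases hc : c = '\n'
    · simp [sp, lineSplitB, hc]
    · simp only [sp, if_neg hc, lineSplitB, ih, modHead]
      simp

theorem join_cons₂ (x y : List Char) (ys : List (List Char)) :
    PySem.Chars.join ['\n'] (x :: y :: ys) = x ++ '\n' :: PySem.Chars.join ['\n'] (y :: ys) := by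
  simp [PySem.Chars.join, List.intercalate]

theorem join_sp (s : List Char) : PySem.Chars.join ['\n'] (sp s) = s := by
  induction s with
  | nil => simp [sp, PySem.Chars.join, List.intercalate]
  | cons c cs ih =>
    cases h : sp cs with
    | nil => exact absurd h (sp_ne_nil cs)
    | cons y ys =>
      by_cases hc : c = '\n'
      · subst hc
        simp only [sp, if_true, h]
        rw [join_cons₂]
        rw [← h, ih]
        simp
      · simp only [sp, if_neg hc, h, modHead, List.singleton_append]
        cases ys with
        | nil =>
          have h2 := ih; rw [h] at h2
          simp only [PySem.Chars.join, List.intercalate] at h2 ⊢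
          simp at h2 ⊢
          simp [h2]
        | cons z zs =>
          rw [join_cons₂, List.cons_append, ← join_cons₂]
          have h2 := ih; rw [h] at h2; rw [h2]

def optJoin : List (List Char) → Option (List Char)
  | [] => none
  | x :: xs => some (PySem.Chars.join ['\n'] (x :: xs))

theorem optJoin_cons (st : List Char) (As : List (List Char)) :
    optJoin (st :: As) =
      some (match optJoin As with | none => st | some q => st ++ '\n' :: q) := by
  cases As with
  | nil => simp [optJoin, PySem.Chars.join, List.intercalate]
  | cons a as => simp [optJoin, join_cons₂]

theorem goB_eq (s : List Char) :
    goB s = (optJoin (dequoteLoopA (sp s)),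
             PySem.Chars.join ['\n'] ((sp s).drop (dequoteLoopA (sp s)).length)) := by
  have hrec := lineSplitB_recon s
  rw [goB, sp_lineSplitB s]
  cases ht : (lineSplitB s).2 with
  | none =>
    rw [ht] at hrec; simp only [List.append_nil] at hrec
    simp only [dequoteLoopA]
    split_ifs with h1 h2 h3 <;>
      simp only [optJoin, PySem.Chars.join_singleton, PySem.Chars.join_nil,
        List.length_cons, List.length_nil, List.drop_succ_cons, List.drop_nil,
        List.drop_zero, ← hrec]
  | some t =>
    rw [ht] at hrec; simp only at hrec
    have ih := goB_eq t
    have hj : PySem.Chars.join ['\n'] ((lineSplitB s).1 :: sp t) = s := by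
      cases h : sp t with
      | nil => exact absurd h (sp_ne_nil t)
      | cons y ys =>
        rw [join_cons₂]
        have h2 : PySem.Chars.join ['\n'] (y :: ys) = t := by rw [← h, join_sp]
        rw [h2]; exact hrec.symm
    simp only [dequoteLoopA]
    split_ifs with h1 h2 h3 <;>
      simp only [ih, optJoin_cons, List.length_cons, List.length_nil,
        List.drop_succ_cons, List.drop_zero, hj]
    simp only [optJoin]
termination_by s.length
decreasing_by exact lineSplitB_tail_lt s t ht

theorem optJoin_getD (As : List (List Char)) :
    (optJoin As).getD [] = PySem.Chars.join ['\n'] As := by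
  cases As <;> simp [optJoin, PySem.Chars.join_nil]

-- ===== VERDICT (by name: the statement is the Claim_ definition above) =====
theorem dequote_spec : Claim_equal_dequote := by
  intro text _
  unfold Spec_dequote dequote dequote_alt
  simp only [splitOn_eq_sp, PySem.List.slice_from_natCast, goB_eq, optJoin_getD]
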